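-- pv_equiv track=rewrite | github.com/strange-journey/entryplug-base | scripts/template_config_toml.py | trim_blank_lines
-- ===== SOURCE A (Python) =====
-- def trim_blank_lines(lines: list[str]) -> list[str]:
--     result = list(lines)
--     while result and result[0] == "":
--         result.pop(0)
--     while result and result[-1] == "":
--         result.pop()
--
--     collapsed: list[str] = []
--     previous_blank = False
--     for line in result:
--         if line == "":
--             if previous_blank:
--                 continue
--             previous_blank = True
--         else:
--             previous_blank = False
--         collapsed.append(line)
--     return collapsed
-- ===== SOURCE B (Python) =====
-- def trim_blank_lines(lines: list[str]) -> list[str]: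
--     out: list[str] = []
--     pending = False
--     for line in lines:
--         if line != "":
--             if pending and out:
--                 out.append("")
--             out.append(line)
--             pending = False
--         else:
--             pending = True
--     return out
-- ===== Notes on version B (the rewrite author's own statement) =====
-- stated objective: simpler
-- what changed: A copies the list, strips leading blanks with repeated pop(0), strips trailing blanks with pop(), then runs a separate collapse pass; B is one forward pass with a pending-blank flag that emits a lone blank separator only between non-blank lines, handling leading/trailing blanks and blank runs in the same sweep.
import Mathlib
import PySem

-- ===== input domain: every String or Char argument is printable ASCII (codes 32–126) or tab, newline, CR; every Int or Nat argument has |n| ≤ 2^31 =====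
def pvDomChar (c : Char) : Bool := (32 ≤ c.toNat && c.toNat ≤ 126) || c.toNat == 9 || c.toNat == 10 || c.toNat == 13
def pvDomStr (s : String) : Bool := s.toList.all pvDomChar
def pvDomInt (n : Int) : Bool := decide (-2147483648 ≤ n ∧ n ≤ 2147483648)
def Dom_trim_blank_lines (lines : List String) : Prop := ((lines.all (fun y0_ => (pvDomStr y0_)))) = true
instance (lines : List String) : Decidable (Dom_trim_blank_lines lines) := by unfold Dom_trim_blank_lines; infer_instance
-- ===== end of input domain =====

-- B replaces A's pop(0)/pop() strip loops and separate collapse pass by a single forward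
-- pass with a pending-blank flag; equivalence of return values is proved (A does not mutate its argument).

-- ===== PORT A =====
-- while result and result[0] == "": result.pop(0)
def dropLeadA : List String → List String
  | [] => []
  | x :: xs => if x = "" then dropLeadA xs else x :: xs

-- while result and result[-1] == "": result.pop()
def popTrailA : List String → List String
  | [] => []
  | x :: xs =>
    if (x :: xs).getLast? = some "" then popTrailA (x :: xs).dropLast
    else x :: xs
termination_by l => l.length
decreasing_by simp

-- the for-loop building `collapsed`, with accumulator `previous_blank`
def collapseA : List String → Bool → List String
  | [], _ => []
  | line :: rest, prev =>
    if line = "" then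
      if prev then collapseA rest prev
      else line :: collapseA rest true
    else line :: collapseA rest false

def trim_blank_lines (lines : List String) : List String :=
  collapseA (popTrailA (dropLeadA lines)) false

-- ===== PORT B =====
-- loop body: state (out, pending)
def altStep (st : List String × Bool) (line : String) : List String × Bool :=
  if line ≠ "" then
    ((if st.2 ∧ st.1 ≠ [] then st.1 ++ [""] else st.1) ++ [line], false)
  else (st.1, true)

def trim_blank_lines_alt (lines : List String) : List String :=
  (lines.foldl altStep ([], false)).1

-- ===== PRECONDITION & SPEC =====
def Spec_trim_blank_lines (lines : List String) (out : List String) : Prop := out = trim_blank_lines_alt lines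
instance (lines : List String) (out : List String) : Decidable (Spec_trim_blank_lines lines out) := by unfold Spec_trim_blank_lines; infer_instance

-- ===== CLAIM (what is proved, stated in full; the proofs are below) =====
def Claim_equal_trim_blank_lines : Prop := ∀ (lines : List String), Dom_trim_blank_lines lines → Spec_trim_blank_lines lines (trim_blank_lines lines)

-- ===== LEMMAS AND PROOFS =====

theorem popTrailA_cons_eq (x : String) (xs : List String) :
    popTrailA (x :: xs) =
      if (x :: xs).getLast? = some "" then popTrailA ((x :: xs).dropLast) else x :: xs := by
  rw [popTrailA.eq_def]

theorem popTrailA_char (l : List String) :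
    popTrailA l = (l.reverse.dropWhile (fun s => s == "")).reverse := by
  induction l using List.reverseRecOn with
  | nil => simp [popTrailA]
  | append_singleton q x ih =>
    rcases q with _ | ⟨a, q'⟩
    · by_cases h : x = "" <;> simp [popTrailA, h]
    · rw [List.cons_append, popTrailA_cons_eq, ← List.cons_append,
          List.getLast?_concat, List.dropLast_concat]
      have hrev : ∀ y : String, (a :: q' ++ [y]).reverse = y :: (a :: q').reverse := by simp
      by_cases h : x = ""
      · subst h
        rw [if_pos rfl, ih, hrev]
        simp [List.dropWhile_cons]
      · rw [if_neg (by simp [h]), hrev, List.dropWhile_cons]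
        simp [h]

theorem popTrailA_concat (q : List String) (x : String) :
    popTrailA (q ++ [x]) = if x = "" then popTrailA q else q ++ [x] := by
  by_cases h : x = "" <;>
    simp [popTrailA_char, h, List.dropWhile_append, List.dropWhile_cons] <;>
    split <;> simp_all

theorem popTrailA_eq_nil_iff (l : List String) :
    popTrailA l = [] ↔ ∀ a ∈ l, a = "" := by
  simp [popTrailA_char, List.dropWhile_eq_nil_iff]

theorem popTrailA_cons (x : String) (d : List String) :
    popTrailA (x :: d) =
      if popTrailA d = [] then (if x = "" then [] else [x]) else x :: popTrailA d := by
  by_cases h : x = "" <;>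
    simp [popTrailA_char, h, List.dropWhile_append] <;>
    split <;> simp_all

theorem collapseA_ne_nil (y : String) (ys : List String) :
    collapseA (y :: ys) false ≠ [] := by
  by_cases h : y = "" <;> simp [collapseA, h]

theorem cA_bf (r : List String) : collapseA ("" :: r) false = "" :: collapseA r true := by
  simp [collapseA]

theorem cA_bt (r : List String) : collapseA ("" :: r) true = collapseA r true := by
  simp [collapseA]

theorem cA_nb (x : String) (r : List String) (pv : Bool) (h : x ≠ "") :
    collapseA (x :: r) pv = x :: collapseA r false := by
  simp [collapseA, h]

-- the key collapse/strip interaction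
theorem collapse_concat (d : List String) (prev : Bool) (ln : String) (hln : ln ≠ "") :
    collapseA (d ++ [ln]) prev =
      collapseA (popTrailA d) prev ++
        (if d.getLast? = some "" ∧ (popTrailA d ≠ [] ∨ prev = false) then ["", ln] else [ln]) := by
  induction d generalizing prev with
  | nil => simp [collapseA, popTrailA, hln]
  | cons x d' ih =>
    rw [List.cons_append, popTrailA_cons]
    rcases d' with _ | ⟨b, d''⟩
    · by_cases hx : x = "" <;> cases prev <;>
        simp [collapseA, popTrailA, hx, hln]
    · by_cases hp : popTrailA (b :: d'') = []
      · have hb : (b :: d'').getLast? = some "" := by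
          have hall := (popTrailA_eq_nil_iff (b :: d'')).mp hp
          rw [List.getLast?_eq_some_getLast (l := b :: d'') (by simp)]
          exact congrArg some (hall _ (List.getLast_mem (by simp)))
        have h1 : collapseA (b :: d'' ++ [ln]) true = [ln] := by
          rw [ih true, hp, hb]; simp [collapseA]
        have h0 : collapseA (b :: d'' ++ [ln]) false = ["", ln] := by
          rw [ih false, hp, hb]; simp [collapseA]
        by_cases hx : x = ""
        · subst hx
          cases prev with
          | false => rw [cA_bf, h1]; simp [collapseA, hp, hb]
          | true => rw [cA_bt, h1]; simp [collapseA, hp, hb]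
        · cases prev <;> (rw [cA_nb _ _ _ hx, h0]; simp [collapseA, hp, hb, hx])
      · rcases hq : popTrailA (b :: d'') with _ | ⟨y, ys⟩
        · exact absurd hq hp
        · have key : ∀ pv : Bool, collapseA (b :: d'' ++ [ln]) pv =
              collapseA (y :: ys) pv ++
                (if (b :: d'').getLast? = some "" then ["", ln] else [ln]) := by
            intro pv; rw [ih pv, hq]; simp
          by_cases hx : x = ""
          · subst hx
            cases prev with
            | false => rw [cA_bf, key true]; simp [collapseA, hq, cA_bt]
            | true => rw [cA_bt, key true]; simp [collapseA, hq, cA_bt]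
          · cases prev <;> (rw [cA_nb _ _ _ hx, key false]; simp [collapseA, hq, hx, cA_nb])

theorem dropLeadA_head_ne (p : List String) (h : dropLeadA p ≠ []) :
    ∃ y ys, dropLeadA p = y :: ys ∧ y ≠ "" := by
  induction p with
  | nil => simp [dropLeadA] at h
  | cons x xs ih =>
    by_cases hx : x = ""
    · rw [dropLeadA, if_pos hx] at h ⊢; exact ih h
    · exact ⟨x, xs, by rw [dropLeadA, if_neg hx], hx⟩

theorem dropLeadA_concat (p : List String) (x : String) :
    dropLeadA (p ++ [x]) =
      if dropLeadA p = [] then (if x = "" then [] else [x]) else dropLeadA p ++ [x] := by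
  induction p with
  | nil => by_cases h : x = "" <;> simp [dropLeadA, h]
  | cons a p' ih =>
    by_cases ha : a = "" <;> simp [dropLeadA, ha, ih]

theorem dropLeadA_getLast? (p : List String) (h : dropLeadA p ≠ []) :
    (dropLeadA p).getLast? = p.getLast? := by
  induction p with
  | nil => rfl
  | cons x xs ih =>
    by_cases hx : x = ""
    · rw [dropLeadA, if_pos hx] at h ⊢
      rw [ih h]
      rcases xs with _ | ⟨b, xs'⟩
      · simp [dropLeadA] at h
      · simp
    · rw [dropLeadA, if_neg hx]

-- A over a prefix extended by one blank line
theorem trimA_concat_blank (p : List String) :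
    trim_blank_lines (p ++ [""]) = trim_blank_lines p := by
  unfold trim_blank_lines
  rw [dropLeadA_concat]
  by_cases h : dropLeadA p = []
  · simp [h, popTrailA]
  · simp [h, popTrailA_concat]

-- A over a prefix extended by one non-blank line; this is exactly B's loop step
theorem trimA_concat_nonblank (p : List String) (ln : String) (hln : ln ≠ "") :
    trim_blank_lines (p ++ [ln]) =
      (if p.getLast? = some "" ∧ trim_blank_lines p ≠ [] then trim_blank_lines p ++ [""]
       else trim_blank_lines p) ++ [ln] := by
  unfold trim_blank_lines
  rw [dropLeadA_concat]
  by_cases h : dropLeadA p = []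
  · have hall : ∀ a ∈ p, a = "" := by
      intro a ha
      by_contra hne
      -- p has a non-blank element, so dropLeadA p ≠ []
      have : dropLeadA p ≠ [] := by
        clear h
        induction p with
        | nil => simp at ha
        | cons x xs ih =>
          by_cases hx : x = ""
          · rw [dropLeadA, if_pos hx]
            rcases List.mem_cons.mp ha with h1 | h1
            · exact absurd (h1 ▸ hx) hne
            · exact ih h1
          · rw [dropLeadA, if_neg hx]; simp
      exact this h
    simp [h, hln, popTrailA, collapseA]
  · obtain ⟨y, ys, hys, hy⟩ := dropLeadA_head_ne p h
    have hpt : popTrailA (dropLeadA p) ≠ [] := by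
      rw [Ne, popTrailA_eq_nil_iff]
      intro hall
      exact hy (hall y (by rw [hys]; simp))
    have hCne : collapseA (popTrailA (dropLeadA p)) false ≠ [] := by
      rcases hq : popTrailA (dropLeadA p) with _ | ⟨z, zs⟩
      · exact absurd hq hpt
      · exact collapseA_ne_nil z zs
    rw [if_neg h, popTrailA_concat, if_neg hln,
        collapse_concat _ _ _ hln, dropLeadA_getLast? p h]
    by_cases hb : p.getLast? = some "" <;> simp [hb, hpt, hCne]

-- B's fold state over a prefix p is (A p, "last line of p is blank")
theorem fold_invariant (p : List String) :
    List.foldl altStep ([], false) p = (trim_blank_lines p, p.getLast? == some "") := by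
  induction p using List.reverseRecOn with
  | nil => simp [trim_blank_lines, dropLeadA, popTrailA, collapseA]
  | append_singleton q x ih =>
    rw [List.foldl_append, ih, List.foldl_cons, List.foldl_nil]
    by_cases hx : x = ""
    · subst hx
      simp [altStep, trimA_concat_blank]
    · rw [altStep, if_pos (by simpa using hx), trimA_concat_nonblank q x hx]
      simp only [List.getLast?_concat]
      by_cases hb : q.getLast? = some "" <;>
        by_cases hn : trim_blank_lines q = [] <;>
        simp [hb, hn, hx]

-- ===== VERDICT (by name: the statement is the Claim_ definition above) =====
theorem trim_blank_lines_spec : Claim_equal_trim_blank_lines := by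
  intro lines _
  unfold Spec_trim_blank_lines trim_blank_lines_alt
  rw [fold_invariant]
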